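-- pv_equiv track=rewrite | github.com/MK2091379/IUST_BSc | Programming Contests/Week8/Q7.py | check_simple_paths
-- ===== SOURCE A (Python) =====
-- def dfs(graph, u, visited):
--     for v in graph[u]:
--         visited[v] += 1
--         if visited[v] > 1:
--             return False
--         if not dfs(graph, v, visited):
--             return False
--     return True
--
-- def check_simple_paths(v, edges):
--     graph = [[] for _ in range(v)]
--     for u, w in edges:
--         graph[u-1].append(w-1)
--     for u in range(v):
--         visited = [0] * v
--         if not dfs(graph, u, visited):
--             return "No"
--     return "Yes"
-- ===== SOURCE B (Python) =====
-- def check_simple_paths(v, edges):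
--     graph = [[] for _ in range(v)]
--     for u, w in edges:
--         graph[u-1].append(w-1)
--     for u in range(v):
--         visited = [0] * v
--         stack = [iter(graph[u])]
--         while stack:
--             w = next(stack[-1], None)
--             if w is None:
--                 stack.pop()
--             else:
--                 visited[w] += 1
--                 if visited[w] > 1:
--                     return "No"
--                 stack.append(iter(graph[w]))
--     return "Yes"
-- ===== Notes on version B (the rewrite author's own statement) =====
-- stated objective: alternative
-- what changed: The recursive dfs helper is replaced by an iterative depth-first traversal with an explicit stack of neighbor iterators inside a single function, preserving the exact visit-increment order (no seen-set shortcut).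
-- outside the precondition, e.g. on check_simple_paths(2, [(1, 1), (1, 100)]): A returns 'No', B returns 'No'
import Mathlib
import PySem

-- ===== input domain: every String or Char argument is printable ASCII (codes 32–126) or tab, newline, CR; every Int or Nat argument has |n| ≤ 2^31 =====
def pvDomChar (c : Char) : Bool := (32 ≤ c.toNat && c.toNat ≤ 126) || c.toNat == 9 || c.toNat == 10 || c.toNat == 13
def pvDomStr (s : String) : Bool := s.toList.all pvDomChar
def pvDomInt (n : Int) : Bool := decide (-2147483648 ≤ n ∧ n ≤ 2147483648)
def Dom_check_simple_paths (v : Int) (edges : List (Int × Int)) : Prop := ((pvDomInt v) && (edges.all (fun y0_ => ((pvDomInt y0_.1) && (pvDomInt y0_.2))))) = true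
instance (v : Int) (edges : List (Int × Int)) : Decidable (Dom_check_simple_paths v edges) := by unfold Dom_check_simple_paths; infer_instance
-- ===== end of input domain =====

-- B replaces A's recursive dfs helper by an iterative DFS with an explicit stack of
-- pending-neighbor lists (same visit order, no seen-set shortcut); return values agree on Pre_.

-- ===== PORT A =====

-- Python list index with wraparound for negative i; exact for -n ≤ i < n (guaranteed by Pre_).
def pvNrm (n : Int) (i : Int) : Nat := (if i < 0 then i + n else i).toNat

-- shared by both ports: `graph = [[] for _ in range(v)]; for u, w in edges: graph[u-1].append(w-1)`
def pvBuild (v : Int) (edges : List (Int × Int)) : List (List Int) :=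
  edges.foldl
    (fun g p =>
      let i := pvNrm v (p.1 - 1)
      g.set i (g.getD i [] ++ [p.2 - 1]))
    (List.replicate v.toNat [])

-- A's recursive `dfs`, made total by a fuel parameter (none = fuel exhausted; fuel
-- 2*v+2 is proved sufficient under Pre_, so the none branch is never taken there).
def pvDfsA (g : List (List Int)) (n : Int) : Nat → List Int → List Int → Option (Bool × List Int)
  | 0, _, _ => none
  | _ + 1, [], vis => some (true, vis)
  | fuel + 1, w :: rest, vis =>
      let j := pvNrm n w
      let c := vis.getD j 0 + 1
      let vis' := vis.set j c
      if c > 1 then some (false, vis')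
      else
        match pvDfsA g n fuel (g.getD j []) vis' with
        | none => none
        | some (false, v2) => some (false, v2)
        | some (true, v2) => pvDfsA g n (fuel + 1) rest v2
  termination_by fuel ns _ => (fuel, ns.length)

-- `for u in range(v): visited = [0]*v; if not dfs(graph, u, visited): return "No"`
def pvOuterA (g : List (List Int)) (n : Int) (fuel : Nat) : List Int → String
  | [] => "Yes"
  | u :: rest =>
      match pvDfsA g n fuel (g.getD u.toNat []) (List.replicate n.toNat 0) with
      | some (true, _) => pvOuterA g n fuel rest
      | _ => "No"

def check_simple_paths (v : Int) (edges : List (Int × Int)) : String :=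
  pvOuterA (pvBuild v edges) v (2 * v.toNat + 2) (PySem.List.pyRange 0 v 1)

-- ===== PORT B =====

-- termination measure for the stack loop: each visited[j] += 1 (with visited[j] ≤ 0) decreases it
def pvM (vis : List Int) : Nat := (vis.map (fun x => (2 - x).toNat)).sum

-- cited by pvRunB's termination proof
theorem pvM_set_lt (vis : List Int) (j : Nat) (h : j < vis.length)
    (hx : vis.getD j 0 ≤ 0) :
    pvM (vis.set j (vis.getD j 0 + 1)) < pvM vis := by
  induction vis generalizing j with
  | nil => simp at h
  | cons x t ih =>
    cases j with
    | zero =>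
      simp only [List.getD_cons_zero] at hx
      simp only [List.getD_cons_zero, List.set_cons_zero, pvM, List.map_cons, List.sum_cons]
      omega
    | succ j =>
      simp only [List.getD_cons_succ] at hx
      simp only [List.getD_cons_succ, List.set_cons_succ, pvM, List.map_cons, List.sum_cons]
      have := ih j (by simpa using h) hx
      simp only [pvM] at this
      omega

-- B's while loop: stack of pending-neighbor lists (head = top of stack);
-- none = "No" (a double visit); the j < vis.length guard is a totality guard
-- (Python raises IndexError there, outside Pre_).
def pvRunB (g : List (List Int)) (n : Int) : List (List Int) → List Int → Option (List Int)
  | [], vis => some vis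
  | [] :: stk, vis => pvRunB g n stk vis
  | (w :: rest) :: stk, vis =>
      let j := pvNrm n w
      if h : j < vis.length then
        let c := vis.getD j 0 + 1
        if _hc : c > 1 then none
        else pvRunB g n ((g.getD j []) :: rest :: stk) (vis.set j c)
      else none
  termination_by stk vis => (pvM vis, (stk.map List.length).sum + stk.length)
  decreasing_by
    · exact Prod.Lex.right _ (by simp)
    · exact Prod.Lex.left _ _ (by
        have hx : vis.getD j 0 ≤ 0 := by omega
        exact pvM_set_lt vis j h hx)

def pvOuterB (g : List (List Int)) (n : Int) : List Int → String
  | [] => "Yes"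
  | u :: rest =>
      match pvRunB g n [g.getD u.toNat []] (List.replicate n.toNat 0) with
      | some _ => pvOuterB g n rest
      | none => "No"

def check_simple_paths_alt (v : Int) (edges : List (Int × Int)) : String :=
  pvOuterB (pvBuild v edges) v (PySem.List.pyRange 0 v 1)

-- ===== PRECONDITION & SPEC =====
-- Pre_ requires every edge endpoint to be a valid Python index into the v lists
-- (after the u-1/w-1 shift, including negative-index wraparound); outside it A raises
-- IndexError, except when a preceding double visit happens to abort the scan first.
def Pre_check_simple_paths (v : Int) (edges : List (Int × Int)) : Prop :=
  ∀ p ∈ edges, (1 - v ≤ p.1 ∧ p.1 ≤ v) ∧ (1 - v ≤ p.2 ∧ p.2 ≤ v)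

instance (v : Int) (edges : List (Int × Int)) : Decidable (Pre_check_simple_paths v edges) := by
  unfold Pre_check_simple_paths; infer_instance

def pvWitness_check_simple_paths : Int × (List (Int × Int)) := (3, [(1, 2), (1, 3)])

def Spec_check_simple_paths (v : Int) (edges : List (Int × Int)) (out : String) : Prop :=
  out = check_simple_paths_alt v edges
instance (v : Int) (edges : List (Int × Int)) (out : String) : Decidable (Spec_check_simple_paths v edges out) := by unfold Spec_check_simple_paths; infer_instance

-- ===== CLAIM (what is proved, stated in full; the proofs are below) =====
def Claim_equal_check_simple_paths : Prop := ∀ (v : Int) (edges : List (Int × Int)), Dom_check_simple_paths v edges → Pre_check_simple_paths v edges → Spec_check_simple_paths v edges (check_simple_paths v edges)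

-- ===== LEMMAS AND PROOFS =====

theorem pvM_set_le (vis : List Int) (j : Nat) :
    pvM (vis.set j (vis.getD j 0 + 1)) ≤ pvM vis := by
  induction vis generalizing j with
  | nil => simp [pvM]
  | cons x t ih =>
    cases j with
    | zero =>
      simp only [List.getD_cons_zero, List.set_cons_zero, pvM, List.map_cons, List.sum_cons]
      omega
    | succ j =>
      simp only [List.getD_cons_succ, List.set_cons_succ, pvM, List.map_cons, List.sum_cons]
      have := ih j
      simp only [pvM] at this
      omega

theorem pvDfsA_len (g : List (List Int)) (n : Int) :
    ∀ (fuel : Nat) (ns vis : List Int) (b : Bool) (v2 : List Int),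
      pvDfsA g n fuel ns vis = some (b, v2) → v2.length = vis.length := by
  intro fuel
  induction fuel with
  | zero => intro ns vis b v2 h; rw [pvDfsA] at h; simp at h
  | succ fuel ihf =>
    intro ns
    induction ns with
    | nil =>
      intro vis b v2 h
      rw [pvDfsA] at h
      simp only [Option.some.injEq, Prod.mk.injEq] at h
      rw [← h.2]
    | cons w rest ihn =>
      intro vis b v2 h
      rw [pvDfsA] at h
      by_cases hc : vis.getD (pvNrm n w) 0 + 1 > 1
      · simp only [if_pos hc, Option.some.injEq, Prod.mk.injEq] at h
        rw [← h.2]; simp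
      · simp only [if_neg hc] at h
        cases hrec : pvDfsA g n fuel (g.getD (pvNrm n w) [])
            (vis.set (pvNrm n w) (vis.getD (pvNrm n w) 0 + 1)) with
        | none => rw [hrec] at h; simp at h
        | some p =>
          obtain ⟨b1, v2'⟩ := p
          rw [hrec] at h
          have hl1 := ihf (g.getD (pvNrm n w) [])
            (vis.set (pvNrm n w) (vis.getD (pvNrm n w) 0 + 1)) b1 v2' hrec
          simp only [List.length_set] at hl1
          cases b1 with
          | false =>
            simp only [Option.some.injEq, Prod.mk.injEq] at h
            rw [← h.2]; omega
          | true =>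
            have := ihn v2' b v2 h
            omega

-- all indices stored in the graph are in range, and the graph has length v
def pvGOK (n : Int) (g : List (List Int)) : Prop :=
  g.length = n.toNat ∧ ∀ l ∈ g, ∀ w ∈ l, pvNrm n w < n.toNat

theorem pvBuild_gok_aux (v : Int) :
    ∀ (edges : List (Int × Int)) (g0 : List (List Int)),
      (∀ p ∈ edges, (1 - v ≤ p.1 ∧ p.1 ≤ v) ∧ (1 - v ≤ p.2 ∧ p.2 ≤ v)) →
      pvGOK v g0 →
      pvGOK v (edges.foldl
        (fun g p => let i := pvNrm v (p.1 - 1); g.set i (g.getD i [] ++ [p.2 - 1])) g0) := by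
  intro edges
  induction edges with
  | nil => intro g0 _ h0; simpa using h0
  | cons p rest ih =>
    intro g0 hp h0
    simp only [List.foldl_cons]
    apply ih _ (fun q hq => hp q (List.mem_cons_of_mem _ hq))
    obtain ⟨hlen, hmem⟩ := h0
    refine ⟨by simpa using hlen, ?_⟩
    intro l hl w hw
    rcases List.mem_or_eq_of_mem_set hl with hl' | rfl
    · exact hmem l hl' w hw
    · rcases List.mem_append.mp hw with hw' | hw'
      · by_cases hi : pvNrm v (p.1 - 1) < g0.length
        · rw [List.getD_eq_getElem g0 [] hi] at hw'
          exact hmem _ (List.getElem_mem hi) w hw'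
        · rw [List.getD_eq_default g0 [] (by omega)] at hw'
          simp at hw'
      · have hb := (hp p (List.mem_cons_self)).2
        have hw2 : w = p.2 - 1 := by simpa using hw'
        subst hw2
        unfold pvNrm
        split <;> omega

theorem pvBuild_gok (v : Int) (edges : List (Int × Int))
    (hp : Pre_check_simple_paths v edges) : pvGOK v (pvBuild v edges) := by
  apply pvBuild_gok_aux v edges _ hp
  refine ⟨by simp, ?_⟩
  intro l hl w hw
  rw [List.eq_of_mem_replicate hl] at hw
  simp at hw

theorem pvDfsA_suff (g : List (List Int)) (n : Int) (hg : pvGOK n g) :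
    ∀ (fuel : Nat) (ns vis : List Int),
      vis.length = n.toNat → (∀ w ∈ ns, pvNrm n w < n.toNat) → pvM vis < fuel →
      ∃ b v2, pvDfsA g n fuel ns vis = some (b, v2) ∧ pvM v2 ≤ pvM vis ∧ v2.length = vis.length := by
  intro fuel
  induction fuel with
  | zero => intro ns vis _ _ hM; omega
  | succ fuel ihf =>
    intro ns
    induction ns with
    | nil => intro vis _ _ _; exact ⟨true, vis, by rw [pvDfsA], le_refl _, rfl⟩
    | cons w rest ihn =>
      intro vis hlen hns hM
      have hj : pvNrm n w < vis.length := by rw [hlen]; exact hns w List.mem_cons_self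
      by_cases hc : vis.getD (pvNrm n w) 0 + 1 > 1
      · refine ⟨false, vis.set (pvNrm n w) (vis.getD (pvNrm n w) 0 + 1), ?_, pvM_set_le _ _, by simp⟩
        rw [pvDfsA]; simp only [if_pos hc]
      · have hx : vis.getD (pvNrm n w) 0 ≤ 0 := by omega
        have hMlt : pvM (vis.set (pvNrm n w) (vis.getD (pvNrm n w) 0 + 1)) < pvM vis :=
          pvM_set_lt vis (pvNrm n w) hj hx
        have hlenset : (vis.set (pvNrm n w) (vis.getD (pvNrm n w) 0 + 1)).length = vis.length := by
          simp
        have hnrec : ∀ w' ∈ g.getD (pvNrm n w) [], pvNrm n w' < n.toNat := by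
          intro w' hw'
          by_cases hjg : pvNrm n w < g.length
          · rw [List.getD_eq_getElem g [] hjg] at hw'
            exact hg.2 _ (List.getElem_mem hjg) w' hw'
          · rw [List.getD_eq_default g [] (by omega)] at hw'; simp at hw'
        obtain ⟨b1, v2, heq1, hM1, hlen1⟩ :=
          ihf (g.getD (pvNrm n w) []) (vis.set (pvNrm n w) (vis.getD (pvNrm n w) 0 + 1))
            (by omega) hnrec (by omega)
        cases b1 with
        | false =>
          refine ⟨false, v2, ?_, by omega, by omega⟩
          rw [pvDfsA]; simp only [if_neg hc, heq1]
        | true =>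
          obtain ⟨b, v3, heq2, hM2, hlen2⟩ :=
            ihn v2 (by omega) (fun w' hw' => hns w' (List.mem_cons_of_mem _ hw')) (by omega)
          refine ⟨b, v3, ?_, by omega, by omega⟩
          rw [pvDfsA]; simp only [if_neg hc, heq1, heq2]

theorem pvSim (g : List (List Int)) (n : Int) (hg : pvGOK n g) :
    ∀ (fuel : Nat) (ns vis : List Int) (stk : List (List Int)) (b : Bool) (v2 : List Int),
      vis.length = n.toNat → (∀ w ∈ ns, pvNrm n w < n.toNat) →
      pvDfsA g n fuel ns vis = some (b, v2) →
      pvRunB g n (ns :: stk) vis = (if b then pvRunB g n stk v2 else none) := by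
  intro fuel
  induction fuel with
  | zero => intro ns vis stk b v2 _ _ h; rw [pvDfsA] at h; simp at h
  | succ fuel ihf =>
    intro ns
    induction ns with
    | nil =>
      intro vis stk b v2 _ _ h
      rw [pvDfsA] at h
      simp only [Option.some.injEq, Prod.mk.injEq] at h
      obtain ⟨hb, hv⟩ := h
      subst hb; subst hv
      rw [pvRunB]; simp
    | cons w rest ihn =>
      intro vis stk b v2 hlen hns h
      have hj : pvNrm n w < vis.length := by rw [hlen]; exact hns w List.mem_cons_self
      rw [pvDfsA] at h
      by_cases hc : vis.getD (pvNrm n w) 0 + 1 > 1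
      · simp only [if_pos hc, Option.some.injEq, Prod.mk.injEq] at h
        obtain ⟨hb, _⟩ := h
        subst hb
        rw [pvRunB]; simp only [dif_pos hj, dif_pos hc, Bool.false_eq_true, if_false]
      · simp only [if_neg hc] at h
        have hnrec : ∀ w' ∈ g.getD (pvNrm n w) [], pvNrm n w' < n.toNat := by
          intro w' hw'
          by_cases hjg : pvNrm n w < g.length
          · rw [List.getD_eq_getElem g [] hjg] at hw'
            exact hg.2 _ (List.getElem_mem hjg) w' hw'
          · rw [List.getD_eq_default g [] (by omega)] at hw'; simp at hw'
        have hrunstep : pvRunB g n ((w :: rest) :: stk) vis =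
            pvRunB g n ((g.getD (pvNrm n w) []) :: rest :: stk)
              (vis.set (pvNrm n w) (vis.getD (pvNrm n w) 0 + 1)) := by
          rw [pvRunB]; simp only [dif_pos hj, dif_neg hc]
        cases hrec : pvDfsA g n fuel (g.getD (pvNrm n w) [])
            (vis.set (pvNrm n w) (vis.getD (pvNrm n w) 0 + 1)) with
        | none => rw [hrec] at h; simp at h
        | some p =>
          obtain ⟨b1, v2'⟩ := p
          rw [hrec] at h
          have hlen' : v2'.length = n.toNat := by
            have := pvDfsA_len g n fuel (g.getD (pvNrm n w) [])
              (vis.set (pvNrm n w) (vis.getD (pvNrm n w) 0 + 1)) b1 v2' hrec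
            simp at this; omega
          have h1 := ihf (g.getD (pvNrm n w) [])
            (vis.set (pvNrm n w) (vis.getD (pvNrm n w) 0 + 1)) (rest :: stk) b1 v2'
            (by simpa using hlen) hnrec hrec
          cases b1 with
          | false =>
            simp only [Option.some.injEq, Prod.mk.injEq] at h
            obtain ⟨hb, _⟩ := h
            subst hb
            rw [hrunstep]
            simp only [Bool.false_eq_true, if_false] at h1 ⊢
            exact h1
          | true =>
            have h2 := ihn v2' stk b v2 hlen'
              (fun w' hw' => hns w' (List.mem_cons_of_mem _ hw')) h
            rw [hrunstep]
            simp only [if_true] at h1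
            rw [h1]
            exact h2

theorem pvOuter_eq (g : List (List Int)) (n : Int) (fuel : Nat) (hg : pvGOK n g)
    (hfuel : 2 * n.toNat < fuel) :
    ∀ us : List Int, pvOuterA g n fuel us = pvOuterB g n us := by
  intro us
  induction us with
  | nil => rfl
  | cons u rest ih =>
    have hns : ∀ w ∈ g.getD u.toNat [], pvNrm n w < n.toNat := by
      intro w hw
      by_cases hu : u.toNat < g.length
      · rw [List.getD_eq_getElem g [] hu] at hw
        exact hg.2 _ (List.getElem_mem hu) w hw
      · rw [List.getD_eq_default g [] (by omega)] at hw; simp at hw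
    have hM0 : pvM (List.replicate n.toNat (0 : Int)) = 2 * n.toNat := by
      simp [pvM, List.map_replicate, List.sum_replicate]
      omega
    obtain ⟨b, v2, heq, _, _⟩ := pvDfsA_suff g n hg fuel (g.getD u.toNat [])
      (List.replicate n.toNat 0) (by simp) hns (by omega)
    have hsim := pvSim g n hg fuel (g.getD u.toNat []) (List.replicate n.toNat 0) [] b v2
      (by simp) hns heq
    cases b with
    | true =>
      calc pvOuterA g n fuel (u :: rest) = pvOuterA g n fuel rest := by rw [pvOuterA, heq]
        _ = pvOuterB g n rest := ih
        _ = pvOuterB g n (u :: rest) := by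
            rw [pvOuterB, hsim]
            simp only [if_true]
            rw [pvRunB]
    | false =>
      calc pvOuterA g n fuel (u :: rest) = "No" := by rw [pvOuterA, heq]
        _ = pvOuterB g n (u :: rest) := by
            rw [pvOuterB, hsim]
            simp

-- ===== VERDICT (by name: the statement is the Claim_ definition above) =====
theorem check_simple_paths_spec : Claim_equal_check_simple_paths := by
  intro v edges _ hp
  unfold Spec_check_simple_paths check_simple_paths check_simple_paths_alt
  exact pvOuter_eq _ v _ (pvBuild_gok v edges hp) (by omega) _
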